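-- pv_equiv track=rewrite | github.com/augRodrigues/eroge-ranking | trim_all.py | find_end
-- ===== SOURCE A (Python) =====
-- def find_end(content, start_idx):
--     """Find the index of the first standalone \\. line after start_idx."""
--     lines = content[start_idx:].split("\n")
--     offset = 0
--     for line in lines:
--         if line.strip() == "\\.":
--             return start_idx + offset
--         offset += len(line) + 1
--     return -1
-- ===== SOURCE B (Python) =====
-- def find_end(content, start_idx):
--     """Find the index of the first standalone \\. line after start_idx."""
--     line_start = start_idx
--     state = 0  # 0: in leading whitespace, 1: seen '\', 2: seen '\.', 3: line cannot match
--     for i in range(start_idx, len(content)):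
--         c = content[i]
--         if c == "\n":
--             if state == 2:
--                 return line_start
--             line_start = i + 1
--             state = 0
--         elif state == 0:
--             state = 1 if c == "\\" else (0 if c.isspace() else 3)
--         elif state == 1:
--             state = 2 if c == "." else 3
--         elif state == 2 and not c.isspace():
--             state = 3
--     return line_start if state == 2 else -1
-- ===== Notes on version B (the rewrite author's own statement) =====
-- stated objective: alternative
-- what changed: A splits the suffix into a list of lines and strips each one; B runs a four-state character automaton over the string in one pass with O(1) extra space, recognising a line of the form ws* backslash dot ws* directly; Pre_ excludes negative start_idx, outside the natural domain (start_idx is an absolute offset into content), where A happens to return via Python's negative-slice wraparound.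
-- outside the precondition, e.g. on find_end('ab\n\\.', -2): A returns -2, B returns 3
import Mathlib
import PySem

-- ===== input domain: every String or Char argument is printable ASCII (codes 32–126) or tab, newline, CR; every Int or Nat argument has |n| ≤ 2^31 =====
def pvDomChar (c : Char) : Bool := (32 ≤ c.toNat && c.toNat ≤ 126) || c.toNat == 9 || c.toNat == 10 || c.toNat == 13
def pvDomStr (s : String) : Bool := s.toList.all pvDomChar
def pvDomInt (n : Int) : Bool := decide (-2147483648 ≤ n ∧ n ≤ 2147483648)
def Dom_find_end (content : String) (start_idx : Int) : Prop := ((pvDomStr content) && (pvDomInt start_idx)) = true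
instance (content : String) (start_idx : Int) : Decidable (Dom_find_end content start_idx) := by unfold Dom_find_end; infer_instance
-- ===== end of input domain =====

-- B replaces A's split-into-lines-and-strip-each scan by a four-state character automaton in a
-- single pass; Pre_ excludes negative start_idx (outside the natural domain: start_idx is an
-- absolute offset into content), where A returns via Python's negative-slice wraparound.


-- ===== PORT A =====
-- the for-loop over the split lines, carrying the offset accumulator
def findEndLoop (start_idx : Int) : List (List Char) → Int → Int
  | [], _ => -1
  | l :: ls, off =>
      if PySem.Chars.strip l = ['\\', '.'] then start_idx + off
      else findEndLoop start_idx ls (off + l.length + 1)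

def find_end (content : String) (start_idx : Int) : Int :=
  let lines := (PySem.Chars.split? (PySem.List.slice content.toList (some start_idx) none) ['\n']).getD []
  findEndLoop start_idx lines 0

-- ===== PORT B =====
-- Source B's for-loop: state 0 = leading whitespace, 1 = seen '\', 2 = seen '\.', 3 = cannot match;
-- line_start and the running index i are carried along, the final return handles the last line
def findEndAltLoop : List Char → Int → Nat → Int → Int
  | [], line_start, state, _ => if state = 2 then line_start else -1
  | c :: rest, line_start, state, i =>
      if c = '\n' then
        if state = 2 then line_start
        else findEndAltLoop rest (i + 1) 0 (i + 1)
      else if state = 0 then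
        findEndAltLoop rest line_start (if c = '\\' then 1 else if PySem.Chars.isspace c then 0 else 3) (i + 1)
      else if state = 1 then
        findEndAltLoop rest line_start (if c = '.' then 2 else 3) (i + 1)
      else if state = 2 ∧ ¬ (PySem.Chars.isspace c = true) then
        findEndAltLoop rest line_start 3 (i + 1)
      else
        findEndAltLoop rest line_start state (i + 1)

def find_end_alt (content : String) (start_idx : Int) : Int :=
  findEndAltLoop (content.toList.drop start_idx.toNat) start_idx 0 start_idx

-- ===== PRECONDITION & SPEC =====
-- Pre_ excludes negative start_idx — outside the natural domain (start_idx is an absolute offset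
-- into content), where A's value comes from Python's negative-slice wraparound.
def Pre_find_end (content : String) (start_idx : Int) : Prop := 0 ≤ start_idx
instance (content : String) (start_idx : Int) : Decidable (Pre_find_end content start_idx) := by unfold Pre_find_end; infer_instance
def pvWitness_find_end : String × Int := ("ab\n\\.\ncd", 1)

def Spec_find_end (content : String) (start_idx : Int) (out : Int) : Prop := out = find_end_alt content start_idx
instance (content : String) (start_idx : Int) (out : Int) : Decidable (Spec_find_end content start_idx out) := by unfold Spec_find_end; infer_instance

-- ===== CLAIM (what is proved, stated in full; the proofs are below) =====
def Claim_equal_find_end : Prop := ∀ (content : String) (start_idx : Int), Dom_find_end content start_idx → Pre_find_end content start_idx → Spec_find_end content start_idx (find_end content start_idx)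

-- ===== LEMMAS AND PROOFS =====

-- structural-recursion equivalent of split("\n"), used only by the proofs
def mySplit : List Char → List (List Char)
  | [] => [[]]
  | c :: rest =>
      if c = '\n' then [] :: mySplit rest
      else match mySplit rest with
        | [] => [[c]]
        | l :: ls => (c :: l) :: ls

theorem mySplit_ne_nil (cs : List Char) : mySplit cs ≠ [] := by
  cases cs with
  | nil => simp [mySplit]
  | cons c rest =>
    simp only [mySplit]
    split_ifs
    · simp
    · cases mySplit rest <;> simp

def consHead (p : List Char) : List (List Char) → List (List Char)
  | [] => [p]
  | l :: ls => (p ++ l) :: ls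

theorem go_eq_mySplit : ∀ (fuel : Nat) (l cur : List Char) (acc : List (List Char)),
    l.length < fuel →
    PySem.Chars.splitOn.go ['\n'] fuel l cur acc = acc.reverse ++ consHead cur.reverse (mySplit l) := by
  intro fuel
  induction fuel with
  | zero => intro l cur acc h; omega
  | succ n ih =>
    intro l cur acc h
    cases l with
    | nil =>
      simp [PySem.Chars.splitOn.go, mySplit, consHead]
    | cons c rest =>
      simp only [PySem.Chars.splitOn.go]
      by_cases hc : c = '\n'
      · subst hc
        rw [if_pos (by simp [List.isPrefixOf])]
        simp only [List.length_cons] at h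
        simp only [List.length_cons, List.drop_succ_cons, List.length_nil, List.drop_zero]
        rw [ih rest [] _ (by omega)]
        have hne := mySplit_ne_nil rest
        cases hms : mySplit rest with
        | nil => exact absurd hms hne
        | cons a as => simp [mySplit, consHead, hms]
      · rw [if_neg (by simp [List.isPrefixOf]; intro hh; exact hc hh.symm)]
        simp only [List.length_cons] at h
        rw [ih rest (c :: cur) acc (by omega)]
        have hne := mySplit_ne_nil rest
        cases hms : mySplit rest with
        | nil => exact absurd hms hne
        | cons a as => simp [mySplit, consHead, hms, hc]

theorem splitOn_eq_mySplit (cs : List Char) : PySem.Chars.splitOn cs ['\n'] = mySplit cs := by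
  rw [PySem.Chars.splitOn, go_eq_mySplit _ _ _ _ (by omega)]
  have hne := mySplit_ne_nil cs
  cases hms : mySplit cs with
  | nil => exact absurd hms hne
  | cons a as => simp [consHead]

theorem mySplit_no_newline (cs : List Char) (h : '\n' ∉ cs) : mySplit cs = [cs] := by
  induction cs with
  | nil => simp [mySplit]
  | cons c rest ih =>
    simp only [List.mem_cons, not_or] at h
    rw [mySplit, if_neg (fun hh : c = '\n' => h.1 hh.symm), ih h.2]

theorem mySplit_with_newline : ∀ (cs : List Char), '\n' ∈ cs →
    mySplit cs = cs.take (cs.idxOf '\n') :: mySplit (cs.drop (cs.idxOf '\n' + 1)) := by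
  intro cs
  induction cs with
  | nil => intro h; simp at h
  | cons c rest ih =>
    intro h
    by_cases hc : c = '\n'
    · subst hc
      simp [mySplit, List.idxOf_cons_self]
    · have hm : '\n' ∈ rest := by
        rcases List.mem_cons.mp h with h1 | h2
        · exact absurd h1.symm hc
        · exact h2
      rw [List.idxOf_cons_ne _ (fun hh => hc hh)]
      simp only [mySplit, if_neg hc, ih hm]
      simp

theorem slice_none_eq_drop (s : List Char) (i : Int) :
    PySem.List.slice s (some i) none = s.drop (PySem.List.clampIdx s.length i) := by
  simp only [PySem.List.slice]
  apply List.take_of_length_le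
  simp

-- the per-character state transition of B's automaton (mirrors the non-'\n' branches of the loop)
def autoStep (state : Nat) (c : Char) : Nat :=
  if state = 0 then if c = '\\' then 1 else if PySem.Chars.isspace c then 0 else 3
  else if state = 1 then if c = '.' then 2 else 3
  else if state = 2 ∧ ¬ (PySem.Chars.isspace c = true) then 3
  else state

theorem altLoop_cons (c : Char) (xs : List Char) (ls : Int) (st : Nat) (i : Int) (hc : c ≠ '\n') :
    findEndAltLoop (c :: xs) ls st i = findEndAltLoop xs ls (autoStep st c) (i + 1) := by
  simp only [findEndAltLoop, autoStep, if_neg hc]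
  split_ifs <;> rfl

theorem altLoop_line (l : List Char) : ∀ (t : List Char) (ls : Int) (st : Nat) (i : Int),
    '\n' ∉ l →
    findEndAltLoop (l ++ t) ls st i = findEndAltLoop t ls (List.foldl autoStep st l) (i + l.length) := by
  induction l with
  | nil => intro t ls st i _; simp
  | cons c r ih =>
    intro t ls st i h
    simp only [List.mem_cons, not_or] at h
    rw [List.cons_append, altLoop_cons c _ ls st i (fun hh => h.1 hh.symm), ih t ls _ (i + 1) h.2]
    simp only [List.foldl_cons, List.length_cons]
    congr 1
    push_cast
    ring

theorem run3 (l : List Char) : List.foldl autoStep 3 l = 3 := by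
  induction l with
  | nil => rfl
  | cons c r ih => simp only [List.foldl_cons, autoStep]; norm_num; exact ih

theorem run2 (l : List Char) : List.foldl autoStep 2 l = 2 ↔ l.all PySem.Chars.isspace := by
  induction l with
  | nil => simp
  | cons c r ih =>
    simp only [List.foldl_cons, List.all_cons]
    by_cases hs : PySem.Chars.isspace c = true
    · have : autoStep 2 c = 2 := by simp [autoStep, hs]
      rw [this, ih]; simp [hs]
    · have : autoStep 2 c = 3 := by simp [autoStep, hs]
      rw [this, run3]; simp [hs]

theorem run1 (l : List Char) :
    List.foldl autoStep 1 l = 2 ↔ ∃ ts, l = '.' :: ts ∧ ts.all PySem.Chars.isspace := by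
  cases l with
  | nil => simp
  | cons c r =>
    simp only [List.foldl_cons]
    by_cases hc : c = '.'
    · subst hc
      have : autoStep 1 '.' = 2 := by simp [autoStep]
      rw [this, run2]
      constructor
      · intro h; exact ⟨r, rfl, h⟩
      · rintro ⟨ts, hts, hall⟩; cases hts; exact hall
    · have : autoStep 1 c = 3 := by simp [autoStep, hc]
      rw [this, run3]
      constructor
      · intro h; omega
      · rintro ⟨ts, hts, -⟩; exact absurd (by cases hts; rfl) hc

theorem rstrip_eq_bsdot (l : List Char) :
    PySem.Chars.rstrip l = ['\\', '.'] ↔ ∃ ts, l = '\\' :: '.' :: ts ∧ ts.all PySem.Chars.isspace := by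
  rw [PySem.Chars.rstrip]
  constructor
  · intro h
    have hrev : List.dropWhile PySem.Chars.isspace l.reverse = ['.', '\\'] := by
      have := congrArg List.reverse h
      simpa using this
    have hsplit := List.takeWhile_append_dropWhile (p := PySem.Chars.isspace) (l := l.reverse)
    refine ⟨(List.takeWhile PySem.Chars.isspace l.reverse).reverse, ?_, ?_⟩
    · have : l.reverse = List.takeWhile PySem.Chars.isspace l.reverse ++ ['.', '\\'] := by
        rw [← hrev] at *; exact hsplit.symm
      have := congrArg List.reverse this
      simpa using this
    · simp only [List.all_eq_true]
      intro c hc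
      exact List.mem_takeWhile_imp (List.mem_reverse.mp hc)
  · rintro ⟨ts, hts, hall⟩
    subst hts
    have : ('\\' :: '.' :: ts).reverse = ts.reverse ++ ['.', '\\'] := by simp
    rw [this]
    have hdw : List.dropWhile PySem.Chars.isspace (ts.reverse ++ ['.', '\\']) = ['.', '\\'] := by
      rw [List.dropWhile_append]
      have h1 : ts.reverse.all PySem.Chars.isspace := by
        simp only [List.all_eq_true] at *
        intro c hc; exact hall c (by simpa using hc)
      have h2 : List.dropWhile PySem.Chars.isspace ts.reverse = [] := by
        rw [List.dropWhile_eq_nil_iff]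
        intro c hc
        simp only [List.all_eq_true] at h1
        exact h1 c hc
      simp [h2, show PySem.Chars.isspace '.' = false from by decide]
    rw [hdw]
    rfl

theorem run0 (l : List Char) :
    List.foldl autoStep 0 l = 2 ↔ PySem.Chars.strip l = ['\\', '.'] := by
  induction l with
  | nil => simp [PySem.Chars.strip, PySem.Chars.lstrip, PySem.Chars.rstrip]
  | cons c r ih =>
    simp only [List.foldl_cons]
    by_cases hb : c = '\\'
    · subst hb
      have h1 : autoStep 0 '\\' = 1 := by simp [autoStep]
      rw [h1, run1]
      have h2 : PySem.Chars.strip ('\\' :: r) = PySem.Chars.rstrip ('\\' :: r) := by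
        simp [PySem.Chars.strip, PySem.Chars.lstrip,
          show PySem.Chars.isspace '\\' = false from by decide]
      rw [h2, rstrip_eq_bsdot]
      constructor
      · rintro ⟨ts, hts, hall⟩; exact ⟨ts, by rw [hts], hall⟩
      · rintro ⟨ts, hts, hall⟩
        simp only [List.cons.injEq, true_and] at hts
        exact ⟨ts, hts, hall⟩
    · by_cases hs : PySem.Chars.isspace c = true
      · have h1 : autoStep 0 c = 0 := by simp [autoStep, hb, hs]
        have h2 : PySem.Chars.strip (c :: r) = PySem.Chars.strip r := by
          simp [PySem.Chars.strip, PySem.Chars.lstrip, hs]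
        rw [h1, h2, ih]
      · have h1 : autoStep 0 c = 3 := by simp [autoStep, hb, hs]
        rw [h1, run3]
        have h2 : PySem.Chars.strip (c :: r) = PySem.Chars.rstrip (c :: r) := by
          simp [PySem.Chars.strip, PySem.Chars.lstrip, hs]
        rw [h2, rstrip_eq_bsdot]
        constructor
        · intro h; omega
        · rintro ⟨ts, hts, -⟩
          simp only [List.cons.injEq] at hts
          exact absurd hts.1 hb

theorem not_mem_take_idxOf (c : Char) : ∀ (cs : List Char), c ∉ cs.take (cs.idxOf c) := by
  intro cs
  induction cs with
  | nil => simp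
  | cons a t ih =>
    by_cases ha : a = c
    · subst ha; simp [List.idxOf_cons_self]
    · rw [List.idxOf_cons_ne _ (fun hh => ha hh)]
      simp only [List.take_succ_cons, List.mem_cons, not_or]
      exact ⟨fun hh => ha hh.symm, ih⟩

theorem altLoop_nil (ls : Int) (st : Nat) (i : Int) :
    findEndAltLoop [] ls st i = if st = 2 then ls else -1 := rfl

theorem altLoop_newline_hit (xs : List Char) (ls : Int) (st : Nat) (i : Int) (hst : st = 2) :
    findEndAltLoop ('\n' :: xs) ls st i = ls := by
  simp [findEndAltLoop, hst]

theorem altLoop_newline_miss (xs : List Char) (ls : Int) (st : Nat) (i : Int) (hst : st ≠ 2) :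
    findEndAltLoop ('\n' :: xs) ls st i = findEndAltLoop xs (i + 1) 0 (i + 1) := by
  simp [findEndAltLoop, hst]

theorem main_loop (start_idx : Int) :
    ∀ (k : Nat) (cs : List Char) (pos : Int), cs.length ≤ k →
    findEndAltLoop cs pos 0 pos = findEndLoop start_idx (mySplit cs) (pos - start_idx) := by
  intro k
  induction k with
  | zero =>
    intro cs pos hk
    have : cs = [] := by cases cs; rfl; simp at hk
    subst this
    simp [altLoop_nil, mySplit, findEndLoop,
      show PySem.Chars.strip ([] : List Char) ≠ ['\\', '.'] from by decide]
  | succ k ih =>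
    intro cs pos hk
    by_cases hmem : '\n' ∈ cs
    · set j := cs.idxOf '\n' with hjdef
      have hj : j < cs.length := List.idxOf_lt_length_of_mem hmem
      have hdecomp : cs = cs.take j ++ '\n' :: cs.drop (j + 1) := by
        conv_lhs => rw [← List.take_append_drop j cs]
        congr 1
        rw [List.drop_eq_getElem_cons hj]
        congr 1
        exact List.getElem_idxOf hj
      have hnl : '\n' ∉ cs.take j := not_mem_take_idxOf '\n' cs
      have htlen : (cs.take j).length = j := by rw [List.length_take]; omega
      rw [mySplit_with_newline cs hmem, ← hjdef, findEndLoop]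
      conv_lhs => rw [hdecomp]
      rw [altLoop_line _ _ pos 0 pos hnl]
      by_cases hm : List.foldl autoStep 0 (cs.take j) = 2
      · rw [if_pos ((run0 _).mp hm), altLoop_newline_hit _ _ _ _ hm]
        omega
      · rw [if_neg (fun hc => hm ((run0 _).mpr hc)), altLoop_newline_miss _ _ _ _ hm]
        have hlen : (cs.drop (j + 1)).length ≤ k := by
          rw [List.length_drop]; omega
        rw [ih (cs.drop (j + 1)) (pos + ↑(cs.take j).length + 1) hlen]
        congr 1
        omega
    · rw [mySplit_no_newline cs hmem, findEndLoop]
      have hcs : cs = cs ++ [] := by simp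
      conv_lhs => rw [hcs]
      rw [altLoop_line cs [] pos 0 pos hmem, altLoop_nil]
      by_cases hm : List.foldl autoStep 0 cs = 2
      · rw [if_pos ((run0 _).mp hm), if_pos hm]
        omega
      · rw [if_neg (fun hc => hm ((run0 _).mpr hc)), if_neg hm]
        simp [findEndLoop]

theorem drop_min_eq (s : List Char) (a : Nat) : s.drop (min a s.length) = s.drop a := by
  by_cases h : a ≤ s.length
  · rw [min_eq_left h]
  · rw [min_eq_right (by omega), List.drop_length, List.drop_eq_nil_iff.mpr (by omega)]

theorem find_end_eq_alt (content : String) (start_idx : Int) (h : 0 ≤ start_idx) :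
    find_end content start_idx = find_end_alt content start_idx := by
  simp only [find_end, find_end_alt]
  have hsep : PySem.Chars.split? (PySem.List.slice content.toList (some start_idx) none) ['\n']
      = some (PySem.Chars.splitOn (PySem.List.slice content.toList (some start_idx) none) ['\n']) := by
    simp [PySem.Chars.split?]
  rw [hsep]
  simp only [Option.getD_some, splitOn_eq_mySplit, slice_none_eq_drop]
  have hclamp : PySem.List.clampIdx content.toList.length start_idx = min start_idx.toNat content.toList.length := by
    simp only [PySem.List.clampIdx]
    split_ifs <;> omega
  rw [hclamp, drop_min_eq]
  rw [main_loop start_idx (content.toList.drop start_idx.toNat).length _ start_idx le_rfl]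
  congr 1
  omega

-- ===== VERDICT (by name: the statement is the Claim_ definition above) =====
theorem find_end_spec : Claim_equal_find_end :=
  fun content start_idx _ hpre => find_end_eq_alt content start_idx hpre
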